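-- pv_equiv track=rewrite | github.com/paramanandmallik/ai-powered-honeypot | agents/detection_agent.py | _recommend_honeypots
-- ===== SOURCE A (Python) =====
-- from typing import Dict, List, Any, Optional, Tuple
--
-- def _recommend_honeypots(analysis_result: Dict[str, Any]) -> List[str]:
--     """Recommend appropriate honeypots based on analysis"""
--     recommended = []
--     mitre_techniques = analysis_result.get("mitre_techniques", [])
--
--     # Map MITRE techniques to honeypot types
--     technique_ids = [t.get("technique_id") for t in mitre_techniques]
--
--     if any(tid in ["T1078", "T1110"] for tid in technique_ids):  # Credential attacks
--         recommended.extend(["web_admin", "ssh"])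
--
--     if any(tid in ["T1083", "T1057"] for tid in technique_ids):  # Discovery
--         recommended.extend(["ssh", "file_share"])
--
--     if any(tid in ["T1021", "T1105"] for tid in technique_ids):  # Lateral movement
--         recommended.extend(["ssh", "database"])
--
--     if any(tid in ["T1566"] for tid in technique_ids):  # Phishing
--         recommended.append("email")
--
--     # Default recommendations if no specific techniques detected
--     if not recommended:
--         recommended = ["web_admin", "ssh"]
--
--     return list(set(recommended))  # Remove duplicates
-- ===== SOURCE B (Python) =====
-- CATEGORY = {"T1078": 0, "T1110": 0, "T1083": 1, "T1057": 1,
--             "T1021": 2, "T1105": 2, "T1566": 3}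
-- HONEYPOTS = [["web_admin", "ssh"], ["ssh", "file_share"],
--              ["ssh", "database"], ["email"]]
--
-- def _recommend_honeypots(analysis_result):
--     """Recommend appropriate honeypots based on analysis (table-driven single pass)."""
--     fired = [False] * 4
--     for t in analysis_result.get("mitre_techniques", []):
--         c = CATEGORY.get(t.get("technique_id"))
--         if c is not None:
--             fired[c] = True
--     recommended = [h for c, hps in enumerate(HONEYPOTS) if fired[c] for h in hps] \
--         or ["web_admin", "ssh"]
--     return list(set(recommended))
-- ===== Notes on version B (the rewrite author's own statement) =====
-- stated objective: simpler
-- what changed: Replaces A's four separate any() scans over technique_ids (plus hard-coded per-branch honeypot lists) by a single table-driven pass that sets one flag per category via a CATEGORY dict, then emits the honeypot lists of the fired categories from a HONEYPOTS table.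
import Mathlib
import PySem

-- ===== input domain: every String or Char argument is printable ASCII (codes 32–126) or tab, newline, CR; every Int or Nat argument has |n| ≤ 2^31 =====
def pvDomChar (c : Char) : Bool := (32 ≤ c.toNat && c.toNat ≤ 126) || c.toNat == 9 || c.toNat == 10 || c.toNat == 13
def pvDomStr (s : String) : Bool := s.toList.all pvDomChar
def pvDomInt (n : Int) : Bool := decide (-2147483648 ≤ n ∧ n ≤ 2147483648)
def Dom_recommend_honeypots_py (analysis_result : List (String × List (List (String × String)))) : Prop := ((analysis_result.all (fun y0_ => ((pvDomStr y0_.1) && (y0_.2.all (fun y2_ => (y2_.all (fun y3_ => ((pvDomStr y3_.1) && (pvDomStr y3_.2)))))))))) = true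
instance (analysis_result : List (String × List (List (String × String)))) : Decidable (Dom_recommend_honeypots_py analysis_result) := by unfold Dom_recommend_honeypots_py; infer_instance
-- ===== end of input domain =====

-- B replaces A's four repeated any() scans over technique_ids by one table-driven pass
-- setting category flags (objective: simpler). Return value compared as a set (list(set(...)) order is hash order in Python).

-- ===== PORT A =====
def recommend_honeypots_py (analysis_result : List (String × List (List (String × String)))) : List String :=
  let recommended : List String := []
  let mitre_techniques := (PySem.Dict.mk analysis_result).getD "mitre_techniques" []
  let technique_ids := mitre_techniques.map (fun t => (PySem.Dict.mk t).get? "technique_id")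
  let recommended := if technique_ids.any (fun tid => tid == some "T1078" || tid == some "T1110")
    then recommended ++ ["web_admin", "ssh"] else recommended
  let recommended := if technique_ids.any (fun tid => tid == some "T1083" || tid == some "T1057")
    then recommended ++ ["ssh", "file_share"] else recommended
  let recommended := if technique_ids.any (fun tid => tid == some "T1021" || tid == some "T1105")
    then recommended ++ ["ssh", "database"] else recommended
  let recommended := if technique_ids.any (fun tid => tid == some "T1566")
    then recommended ++ ["email"] else recommended
  let recommended := if recommended = [] then ["web_admin", "ssh"] else recommended
  PySem.Set.ofList recommended

-- ===== PORT B =====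
-- module-level CATEGORY dict of Source B
def bCategory : PySem.Dict String Nat :=
  PySem.Dict.mk [("T1078", 0), ("T1110", 0), ("T1083", 1), ("T1057", 1),
                 ("T1021", 2), ("T1105", 2), ("T1566", 3)]

-- module-level HONEYPOTS list of Source B
def bHoneypots : List (List String) :=
  [["web_admin", "ssh"], ["ssh", "file_share"], ["ssh", "database"], ["email"]]

-- CATEGORY.get(t.get("technique_id")): a None key hits no string key
def bCatOf (tid : Option String) : Option Nat :=
  match tid with
  | none => none
  | some s => bCategory.get? s

def recommend_honeypots_py_alt (analysis_result : List (String × List (List (String × String)))) : List String :=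
  let fired : List Bool := [false, false, false, false]
  let fired := ((PySem.Dict.mk analysis_result).getD "mitre_techniques" []).foldl
    (fun fs t =>
      match bCatOf ((PySem.Dict.mk t).get? "technique_id") with
      | some c => fs.set c true      -- fired[c] = True (c < 4 always)
      | none => fs) fired
  let recommended := (PySem.List.enumerate bHoneypots).flatMap
    (fun p => if PySem.List.pyGetD fired p.1 false then p.2 else [])
  let recommended := if recommended = [] then ["web_admin", "ssh"] else recommended
  PySem.Set.ofList recommended

-- ===== PRECONDITION & SPEC =====
def Spec_recommend_honeypots_py (analysis_result : List (String × List (List (String × String)))) (out : List String) : Prop := out = recommend_honeypots_py_alt analysis_result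
instance (analysis_result : List (String × List (List (String × String)))) (out : List String) : Decidable (Spec_recommend_honeypots_py analysis_result out) := by unfold Spec_recommend_honeypots_py; infer_instance

-- ===== CLAIM (what is proved, stated in full; the proofs are below) =====
def Claim_equal_recommend_honeypots_py : Prop := ∀ (analysis_result : List (String × List (List (String × String)))), Dom_recommend_honeypots_py analysis_result → Spec_recommend_honeypots_py analysis_result (recommend_honeypots_py analysis_result)

-- ===== LEMMAS AND PROOFS =====

-- the four category predicates, phrased on the technique dict as A reads it
def predCred (t : List (String × String)) : Bool :=
  (PySem.Dict.mk t).get? "technique_id" == some "T1078" || (PySem.Dict.mk t).get? "technique_id" == some "T1110"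
def predDisc (t : List (String × String)) : Bool :=
  (PySem.Dict.mk t).get? "technique_id" == some "T1083" || (PySem.Dict.mk t).get? "technique_id" == some "T1057"
def predLat (t : List (String × String)) : Bool :=
  (PySem.Dict.mk t).get? "technique_id" == some "T1021" || (PySem.Dict.mk t).get? "technique_id" == some "T1105"
def predPhish (t : List (String × String)) : Bool :=
  (PySem.Dict.mk t).get? "technique_id" == some "T1566"

lemma bCatOf_some (s : String) :
    bCatOf (some s) =
      if "T1078" = s ∨ "T1110" = s then some 0
      else if "T1083" = s ∨ "T1057" = s then some 1
      else if "T1021" = s ∨ "T1105" = s then some 2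
      else if "T1566" = s then some 3 else none := by
  unfold bCatOf bCategory
  simp only [PySem.Dict.get?_mk_cons, beq_iff_eq]
  split_ifs with h1 h2 h3 h4 h5 h6 h7 <;> simp_all <;> rfl

lemma fired_foldl (ts : List (List (String × String))) (b0 b1 b2 b3 : Bool) :
    ts.foldl
      (fun fs t =>
        match bCatOf ((PySem.Dict.mk t).get? "technique_id") with
        | some c => fs.set c true
        | none => fs) [b0, b1, b2, b3]
    = [b0 || ts.any predCred, b1 || ts.any predDisc, b2 || ts.any predLat, b3 || ts.any predPhish] := by
  induction ts generalizing b0 b1 b2 b3 with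
  | nil => simp
  | cons t ts ih =>
    simp only [List.foldl_cons, List.any_cons]
    rcases ho : (PySem.Dict.mk t).get? "technique_id" with _ | s
    · simp only [show bCatOf none = none from rfl]
      rw [ih]
      simp [predCred, predDisc, predLat, predPhish, ho]
    · rw [bCatOf_some]
      by_cases h1 : "T1078" = s ∨ "T1110" = s
      · rw [if_pos h1]
        simp only [List.set, ih]
        rcases h1 with h | h <;> subst h <;>
          simp [predCred, predDisc, predLat, predPhish, ho]
      · rw [if_neg h1]
        by_cases h2 : "T1083" = s ∨ "T1057" = s
        · rw [if_pos h2]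
          simp only [List.set, ih]
          rcases h2 with h | h <;> subst h <;>
            simp [predCred, predDisc, predLat, predPhish, ho]
        · rw [if_neg h2]
          by_cases h3 : "T1021" = s ∨ "T1105" = s
          · rw [if_pos h3]
            simp only [List.set, ih]
            rcases h3 with h | h <;> subst h <;>
              simp [predCred, predDisc, predLat, predPhish, ho]
          · rw [if_neg h3]
            rw [not_or] at h1 h2 h3
            by_cases h4 : "T1566" = s
            · rw [if_pos h4]
              subst h4
              simp only [List.set, ih]
              simp [predCred, predDisc, predLat, predPhish, ho]
            · rw [if_neg h4]
              rw [ih]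
              have e1 : (s == "T1078") = false := beq_eq_false_iff_ne.mpr (Ne.symm h1.1)
              have e2 : (s == "T1110") = false := beq_eq_false_iff_ne.mpr (Ne.symm h1.2)
              have e3 : (s == "T1083") = false := beq_eq_false_iff_ne.mpr (Ne.symm h2.1)
              have e4 : (s == "T1057") = false := beq_eq_false_iff_ne.mpr (Ne.symm h2.2)
              have e5 : (s == "T1021") = false := beq_eq_false_iff_ne.mpr (Ne.symm h3.1)
              have e6 : (s == "T1105") = false := beq_eq_false_iff_ne.mpr (Ne.symm h3.2)
              have e7 : (s == "T1566") = false := beq_eq_false_iff_ne.mpr (Ne.symm h4)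
              simp [predCred, predDisc, predLat, predPhish, ho, e1, e2, e3, e4, e5, e6, e7]

-- ===== VERDICT (by name: the statement is the Claim_ definition above) =====
theorem recommend_honeypots_py_spec : Claim_equal_recommend_honeypots_py := by
  intro ar _
  unfold Spec_recommend_honeypots_py recommend_honeypots_py recommend_honeypots_py_alt
  simp only [List.any_map, Function.comp_def, fired_foldl, Bool.false_or]
  set ts := (PySem.Dict.mk ar).getD "mitre_techniques" [] with hts
  have e1 : ts.any (fun t => (PySem.Dict.mk t).get? "technique_id" == some "T1078" || (PySem.Dict.mk t).get? "technique_id" == some "T1110") = ts.any predCred := rfl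
  have e2 : ts.any (fun t => (PySem.Dict.mk t).get? "technique_id" == some "T1083" || (PySem.Dict.mk t).get? "technique_id" == some "T1057") = ts.any predDisc := rfl
  have e3 : ts.any (fun t => (PySem.Dict.mk t).get? "technique_id" == some "T1021" || (PySem.Dict.mk t).get? "technique_id" == some "T1105") = ts.any predLat := rfl
  have e4 : ts.any (fun t => (PySem.Dict.mk t).get? "technique_id" == some "T1566") = ts.any predPhish := rfl
  rw [e1, e2, e3, e4]
  cases ts.any predCred <;> cases ts.any predDisc <;> cases ts.any predLat <;> cases ts.any predPhish <;> rfl
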